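-- pv_equiv track=rewrite | github.com/moong3871/Algorithm | SWEA/04.Stack1/4869.종이붙이기.py | paper_dp
-- ===== SOURCE A (Python) =====
-- def paper_dp(n):
--     if n == 1:
--         return 1
--     elif n == 2:
--         return 3
--     arr = [0, 1, 3]
--     for i in range(3, n+1):
--         paper = arr[i-1] + 2*arr[i-2]
--         arr.append(paper)
--     return arr[n]
-- ===== SOURCE B (Python) =====
-- def paper_dp(n):
--     # closed form of the linear recurrence a(k) = a(k-1) + 2*a(k-2), a(1)=1, a(2)=3:
--     # a(n) = (2**(n+1) + (-1)**n) / 3, computed with one shift instead of the O(n) DP loop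
--     sign = 1 if n % 2 == 0 else -1
--     return ((1 << (n + 1)) + sign) // 3
-- ===== Notes on version B (the rewrite author's own statement) =====
-- stated objective: faster
-- what changed: Replaces the O(n) DP loop that builds the whole array with the closed form a(n) = (2^(n+1) + (-1)^n)/3 of the linear recurrence, computed with a single bit shift.
-- intended difference: For n = 0 and n = -1 A returns leftovers of its seed array via (negative-)index wraparound (0 and 3 respectively), while B returns the closed-form extension of the recurrence (1 and 0), the intended values (one empty tiling for n = 0). — e.g. on paper_dp(0): A returns 0, B returns 1
-- outside the precondition, e.g. on paper_dp(-2): A returns 1, B raises ValueError; on paper_dp(-3): A returns 0, B raises ValueError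
import Mathlib
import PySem

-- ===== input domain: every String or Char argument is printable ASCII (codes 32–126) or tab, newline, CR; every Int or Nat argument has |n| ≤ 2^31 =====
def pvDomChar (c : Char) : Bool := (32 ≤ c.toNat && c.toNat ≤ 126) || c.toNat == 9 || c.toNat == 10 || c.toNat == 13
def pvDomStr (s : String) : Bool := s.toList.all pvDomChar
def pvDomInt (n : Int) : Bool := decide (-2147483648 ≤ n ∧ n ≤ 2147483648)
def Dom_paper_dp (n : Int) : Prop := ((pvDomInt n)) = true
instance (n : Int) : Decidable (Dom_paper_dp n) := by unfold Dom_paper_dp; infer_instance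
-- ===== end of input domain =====

-- B replaces A's O(n) DP loop with the closed form (2^(n+1) + (-1)^n)/3 of the recurrence (one shift): faster.

-- ===== PORT A =====
def paper_dp (n : Int) : Int :=
  if n = 1 then 1
  else if n = 2 then 3
  else
    let arr := (PySem.List.pyRange 3 (n + 1) 1).foldl
      (fun arr i =>
        arr ++ [PySem.List.pyGetD arr (i - 1) 0 + 2 * PySem.List.pyGetD arr (i - 2) 0])
      [0, 1, 3]
    -- pyGetD's default 0 is only reachable for n ≤ -4, where Python raises IndexError (outside Pre_)
    PySem.List.pyGetD arr n 0

-- ===== PORT B =====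
def paper_dp_alt (n : Int) : Int :=
  let sign : Int := if PySem.Int.mod n 2 = 0 then 1 else -1
  -- 1 << (n+1): exact for n ≥ -1; Python raises ValueError on a negative shift count (outside Pre_)
  PySem.Int.floordiv (2 ^ (n + 1).toNat + sign) 3

-- ===== PRECONDITION & SPEC =====
-- Pre_ excludes n ≤ -2: there B's shift raises ValueError (A itself raises IndexError for n ≤ -4
-- and returns accidental negative-index wraparound values of its seed array at n = -2, -3).
def Pre_paper_dp (n : Int) : Prop := -1 ≤ n
instance (n : Int) : Decidable (Pre_paper_dp n) := by unfold Pre_paper_dp; infer_instance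
def pvWitness_paper_dp : Int := (5)

-- For n = 0 and n = -1 A returns leftovers of its seed array via (negative-)index wraparound (0 and 3),
-- while B returns the closed-form extension of the recurrence (1 and 0), the intended values (one empty
-- tiling for n = 0).
def D_paper_dp (n : Int) : Prop := n = 0 ∨ n = -1
instance (n : Int) : Decidable (D_paper_dp n) := by unfold D_paper_dp; infer_instance
def Spec_paper_dp (n : Int) (out : Int) : Prop := ¬ D_paper_dp n → out = paper_dp_alt n
instance (n : Int) (out : Int) : Decidable (Spec_paper_dp n out) := by unfold Spec_paper_dp; infer_instance
def pvDiffWitness_paper_dp : Int := (0)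
def pvDiffWitnessOut_paper_dp : Int × Int := (0, 1)

-- ===== CLAIM (what is proved, stated in full; the proofs are below) =====
def Claim_unchanged_paper_dp : Prop := ∀ (n : Int), Dom_paper_dp n → Pre_paper_dp n → Spec_paper_dp n (paper_dp n)
def Claim_changed_paper_dp : Prop := Dom_paper_dp (pvDiffWitness_paper_dp) ∧ Pre_paper_dp (pvDiffWitness_paper_dp) ∧ D_paper_dp (pvDiffWitness_paper_dp) ∧ paper_dp (pvDiffWitness_paper_dp) = pvDiffWitnessOut_paper_dp.1 ∧ paper_dp_alt (pvDiffWitness_paper_dp) = pvDiffWitnessOut_paper_dp.2 ∧ pvDiffWitnessOut_paper_dp.1 ≠ pvDiffWitnessOut_paper_dp.2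
def Claim_exact_paper_dp : Prop := ∀ (n : Int), Dom_paper_dp n → Pre_paper_dp n → D_paper_dp n → paper_dp n ≠ paper_dp_alt n

-- ===== LEMMAS AND PROOFS =====

-- the recurrence value at DP index k+1 (arr[k+1] of A's loop)
def hSeq : Nat → Int
  | 0 => 1
  | 1 => 3
  | (k + 2) => hSeq (k + 1) + 2 * hSeq k

theorem hSeq_closed (k : Nat) : 3 * hSeq k = 2 ^ (k + 2) + (-1 : Int) ^ (k + 1) := by
  induction k using Nat.twoStepInduction with
  | zero => decide
  | one => decide
  | more k ih1 ih2 =>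
    simp only [hSeq]
    have : 3 * (hSeq (k + 1) + 2 * hSeq k) = 3 * hSeq (k + 1) + 2 * (3 * hSeq k) := by ring
    rw [this, ih1, ih2]; ring

theorem paper_loop (m : Nat) :
    (PySem.List.pyRange 3 (3 + (m : Int)) 1).foldl
      (fun arr i =>
        arr ++ [PySem.List.pyGetD arr (i - 1) 0 + 2 * PySem.List.pyGetD arr (i - 2) 0])
      [0, 1, 3]
    = 0 :: (List.range (m + 2)).map hSeq := by
  induction m with
  | zero =>
    rw [PySem.List.pyRange_one_eq_nil (by norm_num)]
    decide
  | succ m ih =>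
    have hc : ((m + 1 : Nat) : Int) = (m : Int) + 1 := by push_cast; ring
    have h2 : (3 : Int) + ((m : Int) + 1) = (3 + (m : Int)) + 1 := by ring
    rw [hc, h2, PySem.List.pyRange_one_succ_right (by omega : (3:Int) ≤ 3 + (m : Int)),
        List.foldl_append, ih]
    simp only [List.foldl]
    have g1 : PySem.List.pyGetD (0 :: (List.range (m + 2)).map hSeq) ((3:Int) + m - 1) 0
        = hSeq (m + 1) := by
      have : ((3:Int) + m - 1) = ((m + 2 : Nat) : Int) := by push_cast; ring
      rw [this, PySem.List.pyGetD_natCast]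
      simp [List.getD]
    have g2 : PySem.List.pyGetD (0 :: (List.range (m + 2)).map hSeq) ((3:Int) + m - 2) 0
        = hSeq m := by
      have : ((3:Int) + m - 2) = ((m + 1 : Nat) : Int) := by push_cast; ring
      rw [this, PySem.List.pyGetD_natCast]
      simp [List.getD]
    rw [g1, g2]
    have hs : hSeq (m + 1) + 2 * hSeq m = hSeq (m + 2) := rfl
    rw [hs]
    simp [List.range_succ]

theorem paper_dp_eq_hSeq (n : Int) (h3 : 3 ≤ n) : paper_dp n = hSeq (n - 1).toNat := by
  have hn1 : n ≠ 1 := by omega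
  have hn2 : n ≠ 2 := by omega
  simp only [paper_dp, if_neg hn1, if_neg hn2]
  obtain ⟨m, hm⟩ : ∃ m : Nat, n = 3 + (m : Int) := ⟨(n - 3).toNat, by omega⟩
  subst hm
  have hc1 : (3 : Int) + (m : Int) + 1 = 3 + ((m + 1 : Nat) : Int) := by push_cast; ring
  rw [hc1, paper_loop (m + 1)]
  rw [(by push_cast; ring : (3 : Int) + (m : Int) = ((m + 3 : Nat) : Int)),
      PySem.List.pyGetD_natCast]
  have ht : (((m + 3 : Nat) : Int) - 1).toNat = m + 2 := by omega
  rw [ht]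
  simp [List.getD]

theorem alt_eq_hSeq (n : Int) (h1 : 1 ≤ n) : paper_dp_alt n = hSeq (n - 1).toNat := by
  obtain ⟨k, hk⟩ : ∃ k : Nat, n = (k : Int) + 1 := ⟨(n - 1).toNat, by omega⟩
  subst hk
  have htoNat : ((k : Int) + 1 - 1).toNat = k := by omega
  have hpow : ((k : Int) + 1 + 1).toNat = k + 2 := by omega
  have hsign : (if PySem.Int.mod ((k : Int) + 1) 2 = 0 then (1 : Int) else -1)
      = (-1 : Int) ^ (k + 1) := by
    split_ifs with hm
    · rw [PySem.Int.mod_eq_zero_iff_dvd] at hm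
      obtain ⟨t, ht⟩ := hm
      exact (Even.neg_one_pow ⟨t.toNat, by omega⟩).symm
    · rw [PySem.Int.mod_eq_zero_iff_dvd] at hm
      refine (Odd.neg_one_pow ?_).symm
      rcases Nat.even_or_odd (k + 1) with he | ho
      · obtain ⟨t, ht⟩ := he
        exact absurd ⟨(t : Int), by omega⟩ hm
      · exact ho
  simp only [paper_dp_alt, htoNat, hpow, hsign]
  rw [← hSeq_closed k, PySem.Int.floordiv_eq_ediv_of_pos (by norm_num)]
  omega

theorem paper_dp_spec : Claim_unchanged_paper_dp := by
  intro n _ hpre hD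
  show paper_dp n = paper_dp_alt n
  have h1 : 1 ≤ n := by
    unfold Pre_paper_dp at hpre; unfold D_paper_dp at hD; omega
  rcases lt_or_ge n 3 with h | h
  · interval_cases n <;> decide
  · rw [paper_dp_eq_hSeq n h, alt_eq_hSeq n h1]

theorem paper_dp_changed : Claim_changed_paper_dp := by
  unfold Claim_changed_paper_dp; decide

theorem paper_dp_tight : Claim_exact_paper_dp := by
  intro n _ _ hD
  rcases hD with h | h <;> subst h <;> decide
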